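-- pv_equiv track=rewrite | github.com/JsebastianUVPRQ/leetcode_solutions | 2_numbers_on_linked_list.py | countEqualRows
-- ===== SOURCE A (Python) =====
-- def countEqualRows(grid):
--     '''
--     Time complexity: O(n^2)
--     '''
--     n = len(grid)
--     count = 0
--     for i in range(n):
--         for j in range(n):
--             if grid[i] == grid[j]:
--                 count += 1
--     return count
-- ===== SOURCE B (Python) =====
-- def countEqualRows(grid):
--     freq = {}
--     for row in grid:
--         key = tuple(row)
--         freq[key] = freq.get(key, 0) + 1
--     return sum(c * c for c in freq.values())
-- ===== Notes on version B (the rewrite author's own statement) =====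
-- stated objective: faster
-- what changed: Replaced the nested all-pairs row comparison with a single hash-counting pass over the rows followed by a sum of squared frequencies.
import Mathlib
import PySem

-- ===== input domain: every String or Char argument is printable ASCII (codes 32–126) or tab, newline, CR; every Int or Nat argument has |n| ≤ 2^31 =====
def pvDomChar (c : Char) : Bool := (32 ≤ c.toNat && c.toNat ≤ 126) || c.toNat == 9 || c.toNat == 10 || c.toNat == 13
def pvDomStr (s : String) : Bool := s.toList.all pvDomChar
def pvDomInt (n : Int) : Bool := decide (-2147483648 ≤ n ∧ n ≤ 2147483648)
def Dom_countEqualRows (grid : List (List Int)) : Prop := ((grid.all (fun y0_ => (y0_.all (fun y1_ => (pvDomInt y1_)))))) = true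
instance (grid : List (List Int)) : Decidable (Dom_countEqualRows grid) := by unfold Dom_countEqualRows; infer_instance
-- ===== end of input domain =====

-- B replaces A's all-pairs row comparison by one frequency-counting pass and a sum of squared counts.

-- ===== PORT A =====
def countEqualRows (grid : List (List Int)) : Int :=
  let n : Int := PySem.List.len grid
  (PySem.List.pyRange 0 n 1).foldl (fun count i =>
    (PySem.List.pyRange 0 n 1).foldl (fun count j =>
      if PySem.List.pyGetD grid i [] = PySem.List.pyGetD grid j [] then count + 1 else count)
      count) 0

-- ===== PORT B =====
def countEqualRows_alt (grid : List (List Int)) : Int :=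
  let freq := grid.foldl (fun d row => d.insert row (d.getD row 0 + 1))
    (PySem.Dict.empty : PySem.Dict (List Int) Int)
  freq.values.foldl (fun s c => s + c * c) 0

-- ===== PRECONDITION & SPEC =====
def Spec_countEqualRows (grid : List (List Int)) (out : Int) : Prop := out = countEqualRows_alt grid
instance (grid : List (List Int)) (out : Int) : Decidable (Spec_countEqualRows grid out) := by unfold Spec_countEqualRows; infer_instance

-- ===== CLAIM (what is proved, stated in full; the proofs are below) =====
def Claim_equal_countEqualRows : Prop := ∀ (grid : List (List Int)), Dom_countEqualRows grid → Spec_countEqualRows grid (countEqualRows grid)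

-- ===== LEMMAS AND PROOFS =====

-- List.count does not depend on which lawful BEq instance is used.
theorem count_beq_irrel {α : Type} {inst1 inst2 : BEq α}
    [@LawfulBEq α inst1] [@LawfulBEq α inst2] (a : α) (l : List α) :
    @List.count α inst1 a l = @List.count α inst2 a l := by
  rw [@List.count_eq_countP α inst1, @List.count_eq_countP α inst2]
  apply List.countP_congr
  intro x _
  simp

-- A computes the sum, over the rows r of grid, of the number of rows equal to r.
theorem countEqualRows_eq_sum_counts (grid : List (List Int)) :
    countEqualRows grid = (grid.map (fun r => (grid.count r : Int))).sum := by
  unfold countEqualRows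
  have hinner : ∀ (v : List Int) (c : Int),
      (PySem.List.pyRange 0 (PySem.List.len grid) 1).foldl
        (fun count j => if v = PySem.List.pyGetD grid j [] then count + 1 else count) c
      = c + (grid.count v : Int) := by
    intro v c
    rw [PySem.List.foldl_ite_add_one]
    congr 1
    have h1 : (PySem.List.pyRange 0 (PySem.List.len grid) 1).countP
        (fun j => decide (v = PySem.List.pyGetD grid j []))
        = (((PySem.List.pyRange 0 (PySem.List.len grid) 1).map
            (fun j => PySem.List.pyGetD grid j [])).countP (fun x => decide (v = x))) := by
      rw [List.countP_map]; rfl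
    rw [h1, PySem.List.map_pyGetD_pyRange_zero]
    rw [List.count_eq_countP]
    congr 1
    apply List.countP_congr
    intro x _
    simp only [decide_eq_true_eq, beq_iff_eq]
    exact eq_comm
  simp only [hinner]
  rw [PySem.List.foldl_add]
  rw [show (fun i => (grid.count (PySem.List.pyGetD grid i []) : Int))
      = (fun r => (grid.count r : Int)) ∘ (fun i => PySem.List.pyGetD grid i []) from rfl]
  rw [← List.map_map, PySem.List.map_pyGetD_pyRange_zero]
  ring

-- B computes the sum of squared multiplicities over the distinct rows.
theorem countEqualRows_alt_eq_sum_sq (grid : List (List Int)) :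
    countEqualRows_alt grid
      = ((PySem.Set.ofList grid).map
          (fun k => (grid.count k : Int) * (grid.count k : Int))).sum := by
  unfold countEqualRows_alt
  rw [PySem.Dict.foldl_insert_getD_add_one_eq_counter]
  rw [PySem.List.foldl_add (g := fun c => c * c)]
  rw [PySem.Dict.values_eq_map_keys _ (PySem.Dict.nodup_keys_counter grid) 0]
  rw [PySem.Dict.keys_counter]
  rw [List.map_map]
  simp only [Function.comp_def, PySem.Dict.getD_counter]
  ring

-- Purely combinatorial bridge: Σ_{r ∈ grid} count r = Σ_{k distinct} (count k)^2.
theorem sum_counts_eq_sum_sq (grid : List (List Int)) :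
    (grid.map (fun r => (grid.count r : Int))).sum
      = ((PySem.Set.ofList grid).map
          (fun k => (grid.count k : Int) * (grid.count k : Int))).sum := by
  rw [Finset.sum_list_map_count]
  rw [← List.sum_toFinset _ (PySem.Set.nodup_ofList grid)]
  have hfs : (PySem.Set.ofList grid).toFinset = grid.toFinset := by
    ext x
    simp [PySem.Set.mem_ofList]
  rw [hfs]
  apply Finset.sum_congr rfl
  intro m _
  push_cast [nsmul_eq_mul]
  ring_nf
  rw [sq]
  rw [count_beq_irrel]

-- ===== VERDICT (by name: the statement is the Claim_ definition above) =====
theorem countEqualRows_spec : Claim_equal_countEqualRows := by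
  intro grid _
  unfold Spec_countEqualRows
  rw [countEqualRows_eq_sum_counts, countEqualRows_alt_eq_sum_sq, sum_counts_eq_sum_sq]
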